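-- pv_equiv track=rewrite | github.com/Arsen1302/Code-copy-detector | TestData/solutions/problem_694_3.py | solution_694_3
-- ===== SOURCE A (Python) =====
-- from typing import List
--
-- def solution_694_3(values: List[int]) -> int:
--     n = len(values)
--     maximum = 0
--     for i in range(n):
--         for j in range(i+1, n):
--             if i >= j: continue
--             maximum = max(maximum, values[i] + values[j] + i - j)
--     return maximum
-- ===== SOURCE B (Python) =====
-- def solution_694_3(values):
--     # Single pass: track the best values[i]+i seen so far; O(n) instead of O(n^2).
--     if not values:
--         return 0
--     ans = 0
--     best = values[0]
--     for j in range(1, len(values)):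
--         ans = max(ans, best + values[j] - j)
--         best = max(best, values[j] + j)
--     return ans
-- ===== Notes on version B (the rewrite author's own statement) =====
-- stated objective: faster
-- what changed: replaces the quadratic scan of all pairs by a single pass that keeps the running maximum of values[i]+i and combines it with values[j]-j at each j
import Mathlib
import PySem

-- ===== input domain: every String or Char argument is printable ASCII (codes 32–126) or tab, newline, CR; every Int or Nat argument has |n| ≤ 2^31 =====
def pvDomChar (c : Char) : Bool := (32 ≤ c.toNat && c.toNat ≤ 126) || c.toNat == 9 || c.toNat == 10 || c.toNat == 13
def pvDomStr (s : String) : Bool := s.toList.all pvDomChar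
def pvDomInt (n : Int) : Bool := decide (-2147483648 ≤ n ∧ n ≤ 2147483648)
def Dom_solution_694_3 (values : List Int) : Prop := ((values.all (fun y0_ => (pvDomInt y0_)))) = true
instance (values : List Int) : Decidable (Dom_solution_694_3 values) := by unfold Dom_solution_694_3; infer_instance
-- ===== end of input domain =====

-- B replaces A's quadratic scan over all pairs i<j by a single pass keeping the running max of values[i]+i.

-- ===== PORT A =====
-- indices i and j are always in range, so pyGetD's default 0 is never consulted
def solution_694_3 (values : List Int) : Int :=
  let n : Int := values.length
  (PySem.List.pyRange 0 n 1).foldl (fun maximum i =>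
    (PySem.List.pyRange (i+1) n 1).foldl (fun m j =>
      if i ≥ j then m
      else max m (PySem.List.pyGetD values i 0 + PySem.List.pyGetD values j 0 + i - j)) maximum) 0

-- ===== PORT B =====
def solution_694_3_alt (values : List Int) : Int :=
  match values with
  | [] => 0
  | v0 :: _ =>
    ((PySem.List.pyRange 1 (values.length : Int) 1).foldl
      (fun (st : Int × Int) j =>
        (max st.1 (st.2 + PySem.List.pyGetD values j 0 - j),
         max st.2 (PySem.List.pyGetD values j 0 + j))) (0, v0)).1

-- ===== PRECONDITION & SPEC =====
def Spec_solution_694_3 (values : List Int) (out : Int) : Prop := out = solution_694_3_alt values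
instance (values : List Int) (out : Int) : Decidable (Spec_solution_694_3 values out) := by unfold Spec_solution_694_3; infer_instance

-- ===== CLAIM (what is proved, stated in full; the proofs are below) =====
def Claim_equal_solution_694_3 : Prop := ∀ (values : List Int), Dom_solution_694_3 values → Spec_solution_694_3 values (solution_694_3 values)

-- ===== LEMMAS AND PROOFS =====

/-- a fold of `max` is bounded by any common upper bound -/
theorem pv_foldl_max_le (l : List Int) (init M : Int)
    (h0 : init ≤ M) (h : ∀ y ∈ l, y ≤ M) : l.foldl max init ≤ M := by
  induction l generalizing init with
  | nil => exact h0
  | cons a t ih =>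
      exact ih _ (max_le h0 (h a (by simp))) (fun y hy => h y (by simp [hy]))

/-- nested max-folds over a flatMap collapse into one fold -/
theorem pv_foldl_max_flatMap {α : Type} (l : List α) (f : α → List Int) (init : Int) :
    (l.flatMap f).foldl max init = l.foldl (fun m x => (f x).foldl max m) init := by
  induction l generalizing init with
  | nil => rfl
  | cons a t ih => simp [List.flatMap_cons, List.foldl_append, ih]

/-- running max of `c 0, c 1, …, c (j-1)` (B's `best` before index `j`) -/
def pvBB (c : Int → Int) (j : Int) : Int :=
  ((PySem.List.pyRange 1 j 1).map c).foldl max (c 0)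

theorem pvBB_ge (c : Int → Int) (i j : Int) (h0 : 0 ≤ i) (hij : i < j) : c i ≤ pvBB c j := by
  unfold pvBB
  rcases eq_or_lt_of_le h0 with h | h
  · exact h ▸ (PySem.List.le_foldl_max _ (c 0)).1
  · exact (PySem.List.le_foldl_max _ (c 0)).2 (c i)
      (List.mem_map_of_mem (PySem.List.mem_pyRange_one.mpr ⟨h, hij⟩))

theorem pvBB_mem (c : Int → Int) (j : Int) (hj : 1 ≤ j) :
    ∃ i, 0 ≤ i ∧ i < j ∧ pvBB c j = c i := by
  unfold pvBB
  rcases PySem.List.foldl_max_mem ((PySem.List.pyRange 1 j 1).map c) (c 0) with h | h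
  · exact ⟨0, le_refl _, by omega, h⟩
  · rcases List.mem_map.mp h with ⟨i, hi, hci⟩
    rcases PySem.List.mem_pyRange_one.mp hi with ⟨h1, h2⟩
    exact ⟨i, by omega, h2, hci.symm⟩

/-- invariant of B's single pass: the state is (max so far of pvBB j + d j, pvBB (current bound)) -/
theorem pv_Binv (c d : Int → Int) (t : Nat) :
    (PySem.List.pyRange 1 (1 + (t : Int)) 1).foldl
      (fun (st : Int × Int) j => (max st.1 (st.2 + d j), max st.2 (c j))) (0, c 0)
    = (((PySem.List.pyRange 1 (1 + (t : Int)) 1).map (fun j => pvBB c j + d j)).foldl max 0,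
       pvBB c (1 + (t : Int))) := by
  induction t with
  | zero =>
      have h : (1:Int) + ((0:Nat):Int) = 1 := by norm_num
      rw [h, PySem.List.pyRange_one_eq_nil (le_refl (1:Int))]
      simp [pvBB, PySem.List.pyRange_one_eq_nil (le_refl (1:Int))]
  | succ t ih =>
      have hsplit : (PySem.List.pyRange 1 (1 + ((t:Int)+1)) 1)
          = PySem.List.pyRange 1 (1 + (t:Int)) 1 ++ [1 + (t:Int)] := by
        have := PySem.List.pyRange_one_succ_right (a:=1) (b:=1+(t:Int)) (by omega)
        rw [← this]; ring_nf
      have hbb : pvBB c (1 + ((t:Int)+1)) = max (pvBB c (1 + (t:Int))) (c (1 + (t:Int))) := by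
        unfold pvBB
        rw [hsplit, List.map_append, List.foldl_append]; rfl
      push_cast
      rw [hsplit, List.foldl_append, List.map_append, List.foldl_append, ih, hbb]
      rfl

/-- A's nested loops compute the max of 0 and of (v i + i) + (v j - j) over all pairs i < j -/
theorem pv_A_eq (values : List Int) :
    solution_694_3 values
    = ((PySem.List.pyRange 0 (values.length : Int) 1).flatMap (fun i =>
        (PySem.List.pyRange (i+1) (values.length : Int) 1).map (fun j =>
          (PySem.List.pyGetD values i 0 + i) + (PySem.List.pyGetD values j 0 - j)))).foldl max 0 := by
  unfold solution_694_3
  rw [pv_foldl_max_flatMap]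
  refine PySem.List.foldl_congr_mem' _ _ _ _ ?_
  intro i hi m
  rw [List.foldl_map]
  refine PySem.List.foldl_congr_mem' _ _ _ _ ?_
  intro j hj acc
  rcases PySem.List.mem_pyRange_one.mp hj with ⟨h1, h2⟩
  rw [if_neg (by omega)]
  congr 1
  omega

/-- exchanging the maxima: the pairwise max equals the max over j of (best c before j) + d j -/
theorem pv_main (values : List Int) :
    ((PySem.List.pyRange 0 (values.length : Int) 1).flatMap (fun i =>
        (PySem.List.pyRange (i+1) (values.length : Int) 1).map (fun j =>
          (PySem.List.pyGetD values i 0 + i) + (PySem.List.pyGetD values j 0 - j)))).foldl max 0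
    = ((PySem.List.pyRange 1 (values.length : Int) 1).map
        (fun j => pvBB (fun i => PySem.List.pyGetD values i 0 + i) j
                  + (PySem.List.pyGetD values j 0 - j))).foldl max 0 := by
  set n : Int := (values.length : Int) with hn
  set c : Int → Int := fun i => PySem.List.pyGetD values i 0 + i with hc
  set d : Int → Int := fun j => PySem.List.pyGetD values j 0 - j with hd
  apply le_antisymm
  · apply pv_foldl_max_le _ _ _ (PySem.List.le_foldl_max _ 0).1
    intro y hy
    rcases List.mem_flatMap.mp hy with ⟨i, hi, hyi⟩
    rcases List.mem_map.mp hyi with ⟨j, hj, rfl⟩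
    rcases PySem.List.mem_pyRange_one.mp hi with ⟨hi0, hin⟩
    rcases PySem.List.mem_pyRange_one.mp hj with ⟨hj1, hjn⟩
    calc c i + d j ≤ pvBB c j + d j := by
          have := pvBB_ge c i j hi0 (by omega); omega
      _ ≤ _ := by
          have hj1' : (1:Int) ≤ j := by omega
          exact (PySem.List.le_foldl_max _ 0).2 _
            (List.mem_map_of_mem (PySem.List.mem_pyRange_one.mpr ⟨hj1', hjn⟩))
  · apply pv_foldl_max_le _ _ _ (PySem.List.le_foldl_max _ 0).1
    intro y hy
    rcases List.mem_map.mp hy with ⟨j, hj, rfl⟩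
    rcases PySem.List.mem_pyRange_one.mp hj with ⟨hj1, hjn⟩
    rcases pvBB_mem c j hj1 with ⟨i, hi0, hij, hbb⟩
    rw [hbb]
    refine (PySem.List.le_foldl_max _ 0).2 _ ?_
    refine List.mem_flatMap.mpr ⟨i, PySem.List.mem_pyRange_one.mpr ⟨hi0, by omega⟩, ?_⟩
    exact List.mem_map_of_mem (PySem.List.mem_pyRange_one.mpr ⟨by omega, hjn⟩)

/-- B's fold (with its literal step function and init) computes the same max over j -/
theorem pv_Binv' (v0 : Int) (rest : List Int) :
    ((PySem.List.pyRange 1 (1 + (rest.length : Int)) 1).foldl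
      (fun (st : Int × Int) j =>
        (max st.1 (st.2 + PySem.List.pyGetD (v0::rest) j 0 - j),
         max st.2 (PySem.List.pyGetD (v0::rest) j 0 + j))) (0, v0)).1
    = ((PySem.List.pyRange 1 (1 + (rest.length : Int)) 1).map
        (fun j => pvBB (fun i => PySem.List.pyGetD (v0::rest) i 0 + i) j
                  + (PySem.List.pyGetD (v0::rest) j 0 - j))).foldl max 0 := by
  have hinit : ((fun i => PySem.List.pyGetD (v0::rest) i 0 + i) 0) = v0 := by
    simp [PySem.List.pyGetD_zero_cons]
  have h := pv_Binv (fun i => PySem.List.pyGetD (v0::rest) i 0 + i)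
                    (fun j => PySem.List.pyGetD (v0::rest) j 0 - j) rest.length
  have hcong : (PySem.List.pyRange 1 (1 + (rest.length : Int)) 1).foldl
      (fun (st : Int × Int) j =>
        (max st.1 (st.2 + PySem.List.pyGetD (v0::rest) j 0 - j),
         max st.2 (PySem.List.pyGetD (v0::rest) j 0 + j))) (0, v0)
      = (PySem.List.pyRange 1 (1 + (rest.length : Int)) 1).foldl
      (fun (st : Int × Int) j =>
        (max st.1 (st.2 + ((fun j => PySem.List.pyGetD (v0::rest) j 0 - j) j)),
         max st.2 ((fun i => PySem.List.pyGetD (v0::rest) i 0 + i) j)))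
      (0, ((fun i => PySem.List.pyGetD (v0::rest) i 0 + i) 0)) := by
    rw [hinit]
    refine PySem.List.foldl_congr_mem' _ _ _ _ ?_
    intro j hj st
    simp only []
    rw [add_sub_assoc]
  rw [hcong, h]

-- ===== VERDICT (by name: the statement is the Claim_ definition above) =====
theorem solution_694_3_spec : Claim_equal_solution_694_3 := by
  intro values _
  unfold Spec_solution_694_3
  cases values with
  | nil => decide
  | cons v0 rest =>
    have hlen : (((v0 :: rest).length : Nat) : Int) = 1 + (rest.length : Int) := by
      push_cast [List.length_cons]; ring
    rw [pv_A_eq, pv_main]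
    simp only [solution_694_3_alt, hlen]
    rw [pv_Binv']
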